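-- pv_equiv track=rewrite | github.com/NicklasKleemann/DIS | LectureExercise.py | chunk_indices
-- ===== SOURCE A (Python) =====
-- from typing import Counter, Dict, Iterable, List, Tuple
--
-- def chunk_indices(n_items: int, n_chunks: int) -> List[Tuple[int, int]]:
-- 	"""Return (start, end) half-open index ranges that partition n_items into n_chunks as evenly as possible."""
-- 	n_chunks = max(1, min(n_chunks, n_items or 1))
-- 	base = n_items // n_chunks
-- 	rem = n_items % n_chunks
-- 	ranges: List[Tuple[int, int]] = []
-- 	start = 0
-- 	for i in range(n_chunks):
-- 		size = base + (1 if i < rem else 0)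
-- 		end = start + size
-- 		ranges.append((start, end))
-- 		start = end
-- 	return ranges
-- ===== SOURCE B (Python) =====
-- def chunk_indices(n_items: int, n_chunks: int):
-- 	"""Return (start, end) half-open index ranges that partition n_items into n_chunks as evenly as possible."""
-- 	n_chunks = max(1, min(n_chunks, n_items or 1))
-- 	base, rem = divmod(n_items, n_chunks)
-- 	return [(i * base + min(i, rem), (i + 1) * base + min(i + 1, rem))
-- 	        for i in range(n_chunks)]
-- ===== Notes on version B (the rewrite author's own statement) =====
-- stated objective: alternative
-- what changed: Each chunk's boundaries are computed independently by the closed form start_i = i*base + min(i, rem), eliminating the running 'start' accumulator carried across loop iterations.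
import Mathlib
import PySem

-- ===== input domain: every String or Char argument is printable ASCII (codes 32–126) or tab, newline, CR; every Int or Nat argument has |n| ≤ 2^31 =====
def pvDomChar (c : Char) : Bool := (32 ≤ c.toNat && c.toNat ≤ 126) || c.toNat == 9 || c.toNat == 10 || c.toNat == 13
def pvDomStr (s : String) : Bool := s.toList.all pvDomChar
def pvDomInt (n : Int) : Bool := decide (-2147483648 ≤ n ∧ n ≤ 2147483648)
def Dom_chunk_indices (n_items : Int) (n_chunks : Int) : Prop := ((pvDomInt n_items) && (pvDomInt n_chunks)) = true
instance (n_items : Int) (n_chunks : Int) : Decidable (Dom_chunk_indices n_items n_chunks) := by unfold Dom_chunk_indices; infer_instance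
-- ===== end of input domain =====

-- B computes each chunk boundary independently via the closed form i*base + min(i, rem),
-- eliminating A's running 'start' accumulator (objective: alternative decomposition).


-- ===== PORT A =====
def chunk_indices (n_items : Int) (n_chunks : Int) : List (Int × Int) :=
  -- n_chunks = max(1, min(n_chunks, n_items or 1))
  let m := max 1 (min n_chunks (if n_items = 0 then 1 else n_items))
  let base := PySem.Int.floordiv n_items m
  let rem := PySem.Int.mod n_items m
  -- for i in range(n_chunks): accumulate (ranges, start)
  let st := (PySem.List.pyRange 0 m 1).foldl
    (fun (s : List (Int × Int) × Int) i =>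
      let size := base + (if i < rem then 1 else 0)
      let e := s.2 + size
      (s.1 ++ [(s.2, e)], e))
    ([], 0)
  st.1

-- ===== PORT B =====
def chunk_indices_alt (n_items : Int) (n_chunks : Int) : List (Int × Int) :=
  let m := max 1 (min n_chunks (if n_items = 0 then 1 else n_items))
  let base := PySem.Int.floordiv n_items m
  let rem := PySem.Int.mod n_items m
  (PySem.List.pyRange 0 m 1).map
    (fun i => (i * base + min i rem, (i + 1) * base + min (i + 1) rem))

-- ===== PRECONDITION & SPEC =====
def Spec_chunk_indices (n_items : Int) (n_chunks : Int) (out : List (Int × Int)) : Prop := out = chunk_indices_alt n_items n_chunks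
instance (n_items : Int) (n_chunks : Int) (out : List (Int × Int)) : Decidable (Spec_chunk_indices n_items n_chunks out) := by unfold Spec_chunk_indices; infer_instance

-- ===== CLAIM (what is proved, stated in full; the proofs are below) =====
def Claim_equal_chunk_indices : Prop := ∀ (n_items : Int) (n_chunks : Int), Dom_chunk_indices n_items n_chunks → Spec_chunk_indices n_items n_chunks (chunk_indices n_items n_chunks)

-- ===== LEMMAS AND PROOFS =====

-- A's loop, started at index a with the closed-form start value, produces the mapped closed forms.
theorem pvLoop_eq (base rem : Int) : ∀ (n : Nat) (a : Int) (acc : List (Int × Int)),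
    (PySem.List.pyRange a (a + n) 1).foldl
      (fun (s : List (Int × Int) × Int) i =>
        let size := base + (if i < rem then 1 else 0)
        let e := s.2 + size
        (s.1 ++ [(s.2, e)], e))
      (acc, a * base + min a rem)
    = (acc ++ (PySem.List.pyRange a (a + n) 1).map
        (fun i => (i * base + min i rem, (i + 1) * base + min (i + 1) rem)),
       (a + n) * base + min (a + n) rem) := by
  intro n
  induction n with
  | zero =>
    intro a acc
    rw [PySem.List.pyRange_one_eq_nil (by omega)]
    simp
  | succ n ih =>
    intro a acc
    rw [PySem.List.pyRange_one_cons (by omega)]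
    simp only [List.foldl_cons, List.map_cons]
    have hstep : a * base + min a rem + (base + (if a < rem then 1 else 0))
        = (a + 1) * base + min (a + 1) rem := by
      split_ifs with h <;> simp [min_def] <;> split_ifs <;> ring_nf <;> omega
    rw [hstep]
    have := ih (a + 1) (acc ++ [(a * base + min a rem, (a + 1) * base + min (a + 1) rem)])
    have harg : a + 1 + (n : Int) = a + ((n : Nat) + 1 : Nat) := by push_cast; ring
    rw [harg] at this
    rw [this]
    simp

-- ===== VERDICT (by name: the statement is the Claim_ definition above) =====
theorem chunk_indices_spec : Claim_equal_chunk_indices := by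
  intro n_items n_chunks _
  unfold Spec_chunk_indices chunk_indices chunk_indices_alt
  set m := max 1 (min n_chunks (if n_items = 0 then 1 else n_items)) with hm
  have hmpos : 0 < m := by positivity
  have hrem : 0 ≤ PySem.Int.mod n_items m := PySem.Int.mod_nonneg _ hmpos
  have h0 : ([] : List (Int × Int)) = [] := rfl
  have key := pvLoop_eq (PySem.Int.floordiv n_items m) (PySem.Int.mod n_items m) m.toNat 0 []
  have hcast : (0 : Int) + (m.toNat : Int) = m := by omega
  rw [hcast] at key
  have hstart : (0 : Int) * PySem.Int.floordiv n_items m + min 0 (PySem.Int.mod n_items m) = 0 := by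
    rw [min_eq_left hrem]; ring
  rw [hstart] at key
  simp only [key, List.nil_append]
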